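-- pv_equiv track=rewrite | github.com/lukeallen012/propflow | scraper.py | _parse_distress_flags
-- ===== SOURCE A (Python) =====
-- def _parse_distress_flags(row: dict, dom: int) -> list[str]:
--     """Extract distress signals from a Redfin CSV row."""
--     flags = []
--     status = row.get("STATUS", "").lower()
--     tags   = row.get("TAGS", "").lower()
--
--     for field in (status, tags):
--         if "foreclosure" in field or "pre-foreclosure" in field:
--             flags.append("pre-foreclosure")
--         if "short sale" in field:
--             flags.append("short sale")
--         if "reo" in field or "bank owned" in field or "bank-owned" in field:
--             flags.append("REO")
--         if "auction" in field:
--             flags.append("auction")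
--
--     # Price reduction column (sometimes present)
--     price_reduction = row.get("PRICE REDUCTION", "") or row.get("PRICE DROP", "")
--     if price_reduction and price_reduction.strip() not in ("", "0", "$0"):
--         flags.append("price cut")
--
--     if dom >= 90:
--         flags.append(f"long DOM")
--     elif dom >= 60:
--         flags.append(f"long DOM")
--
--     return flags
-- ===== SOURCE B (Python) =====
-- _RULES = [
--     (("foreclosure", "pre-foreclosure"), "pre-foreclosure"),
--     (("short sale",), "short sale"),
--     (("reo", "bank owned", "bank-owned"), "REO"),
--     (("auction",), "auction"),
-- ]
--
--
-- def _parse_distress_flags(row: dict, dom: int) -> list[str]: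
--     """Extract distress signals from a Redfin CSV row.
--
--     Recursive version: the flag list is built back-to-front by consing onto
--     the already-computed tail (price-cut / long-DOM flags form the base case),
--     descending over the flattened (field, keywords, flag) item list.
--     """
--     fields = [row.get(k, "").lower() for k in ("STATUS", "TAGS")]
--     items = [(f, kws, fl) for f in fields for kws, fl in _RULES]
--     pr = row.get("PRICE REDUCTION", "") or row.get("PRICE DROP", "")
--
--     def tail():
--         t = ["long DOM"] if dom >= 60 else []
--         if pr and pr.strip() not in ("", "0", "$0"):
--             t = ["price cut"] + t
--         return t
--
--     def go(i):
--         if i == len(items):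
--             return tail()
--         f, kws, fl = items[i]
--         rest = go(i + 1)
--         return [fl] + rest if any(k in f for k in kws) else rest
--
--     return go(0)
-- ===== Notes on version B (the rewrite author's own statement) =====
-- stated objective: alternative
-- what changed: Replaced A's imperative per-field if-cascade with an append accumulator by a recursive descent over the flattened (field, keywords, flag) item list that conses matched flags onto the already-computed tail (the price-cut/long-DOM flags form the base case), building the output back-to-front; the two identical DOM branches collapse into one dom >= 60 check.
import Mathlib
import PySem

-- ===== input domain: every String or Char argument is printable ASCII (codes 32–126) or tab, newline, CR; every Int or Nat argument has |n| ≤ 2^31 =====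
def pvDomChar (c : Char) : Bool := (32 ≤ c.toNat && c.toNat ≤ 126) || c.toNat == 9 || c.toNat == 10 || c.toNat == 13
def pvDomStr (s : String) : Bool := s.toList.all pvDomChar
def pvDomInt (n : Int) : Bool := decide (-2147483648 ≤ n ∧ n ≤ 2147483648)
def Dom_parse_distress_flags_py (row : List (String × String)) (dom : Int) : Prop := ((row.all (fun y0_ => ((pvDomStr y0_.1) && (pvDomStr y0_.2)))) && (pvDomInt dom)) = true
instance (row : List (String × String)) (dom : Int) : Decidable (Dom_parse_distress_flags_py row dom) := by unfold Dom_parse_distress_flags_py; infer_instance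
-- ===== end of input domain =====

-- B rebuilds the flag list by recursive descent over a flattened (field, keywords, flag) item
-- list, consing matched flags onto the precomputed tail (price-cut/long-DOM), instead of A's
-- imperative if-cascade with an append accumulator; objective: alternative. Return values only.

-- ===== PORT A =====
def parse_distress_flags_py (row : List (String × String)) (dom : Int) : List String :=
  let status := PySem.Str.lower (PySem.Dict.getD ⟨row⟩ "STATUS" "")
  let tags := PySem.Str.lower (PySem.Dict.getD ⟨row⟩ "TAGS" "")
  let flags : List String := []
  let flags := [status, tags].foldl (fun flags field =>
    let flags := if PySem.Str.isIn "foreclosure" field || PySem.Str.isIn "pre-foreclosure" field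
      then flags ++ ["pre-foreclosure"] else flags
    let flags := if PySem.Str.isIn "short sale" field then flags ++ ["short sale"] else flags
    let flags := if PySem.Str.isIn "reo" field || PySem.Str.isIn "bank owned" field || PySem.Str.isIn "bank-owned" field
      then flags ++ ["REO"] else flags
    if PySem.Str.isIn "auction" field then flags ++ ["auction"] else flags) flags
  -- Python 'a or b' on strings: a if a is truthy (non-empty) else b
  let pr0 := PySem.Dict.getD ⟨row⟩ "PRICE REDUCTION" ""
  let price_reduction := if pr0 ≠ "" then pr0 else PySem.Dict.getD ⟨row⟩ "PRICE DROP" ""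
  let flags := if price_reduction ≠ "" ∧ PySem.Str.strip price_reduction ∉ (["", "0", "$0"] : List String)
    then flags ++ ["price cut"] else flags
  if dom ≥ 90 then flags ++ ["long DOM"]
  else if dom ≥ 60 then flags ++ ["long DOM"]
  else flags

-- ===== PORT B =====
def pvRules : List (List String × String) :=
  [(["foreclosure", "pre-foreclosure"], "pre-foreclosure"),
   (["short sale"], "short sale"),
   (["reo", "bank owned", "bank-owned"], "REO"),
   (["auction"], "auction")]

-- recursive descent over the item list, consing matched flags onto the tail
def pvGo (items : List (String × List String × String)) (tail : List String) : List String :=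
  match items with
  | [] => tail
  | (f, kws, fl) :: rest =>
    let r := pvGo rest tail
    if kws.any (fun k => PySem.Str.isIn k f) then fl :: r else r

def parse_distress_flags_py_alt (row : List (String × String)) (dom : Int) : List String :=
  let fields := ["STATUS", "TAGS"].map (fun k => PySem.Str.lower (PySem.Dict.getD ⟨row⟩ k ""))
  let items := fields.flatMap (fun f => pvRules.map (fun r => (f, r.1, r.2)))
  let pr0 := PySem.Dict.getD ⟨row⟩ "PRICE REDUCTION" ""
  let pr := if pr0 ≠ "" then pr0 else PySem.Dict.getD ⟨row⟩ "PRICE DROP" ""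
  let t := if dom ≥ 60 then ["long DOM"] else []
  let t := if pr ≠ "" ∧ PySem.Str.strip pr ∉ (["", "0", "$0"] : List String)
    then "price cut" :: t else t
  pvGo items t

-- ===== PRECONDITION & SPEC =====
def Spec_parse_distress_flags_py (row : List (String × String)) (dom : Int) (out : List String) : Prop := out = parse_distress_flags_py_alt row dom
instance (row : List (String × String)) (dom : Int) (out : List String) : Decidable (Spec_parse_distress_flags_py row dom out) := by unfold Spec_parse_distress_flags_py; infer_instance

-- ===== CLAIM (what is proved, stated in full; the proofs are below) =====
def Claim_equal_parse_distress_flags_py : Prop := ∀ (row : List (String × String)) (dom : Int), Dom_parse_distress_flags_py row dom → Spec_parse_distress_flags_py row dom (parse_distress_flags_py row dom)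

-- ===== LEMMAS AND PROOFS =====
-- proof-side decompositions of the two ports (each is rfl-equal to a piece of its port)

-- A's per-field if-cascade, as a named function (definitionally the body of A's foldl)
def chunkA (field : String) (flags : List String) : List String :=
  let flags := if PySem.Str.isIn "foreclosure" field || PySem.Str.isIn "pre-foreclosure" field
    then flags ++ ["pre-foreclosure"] else flags
  let flags := if PySem.Str.isIn "short sale" field then flags ++ ["short sale"] else flags
  let flags := if PySem.Str.isIn "reo" field || PySem.Str.isIn "bank owned" field || PySem.Str.isIn "bank-owned" field
    then flags ++ ["REO"] else flags
  if PySem.Str.isIn "auction" field then flags ++ ["auction"] else flags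

-- A's trailing price-cut / DOM appends, as a named function
def tailAfterA (row : List (String × String)) (dom : Int) (flags : List String) : List String :=
  let pr0 := PySem.Dict.getD ⟨row⟩ "PRICE REDUCTION" ""
  let price_reduction := if pr0 ≠ "" then pr0 else PySem.Dict.getD ⟨row⟩ "PRICE DROP" ""
  let flags := if price_reduction ≠ "" ∧ PySem.Str.strip price_reduction ∉ (["", "0", "$0"] : List String)
    then flags ++ ["price cut"] else flags
  if dom ≥ 90 then flags ++ ["long DOM"]
  else if dom ≥ 60 then flags ++ ["long DOM"]
  else flags

-- B's tail (the base case of pvGo)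
def tailB (row : List (String × String)) (dom : Int) : List String :=
  let pr0 := PySem.Dict.getD ⟨row⟩ "PRICE REDUCTION" ""
  let pr := if pr0 ≠ "" then pr0 else PySem.Dict.getD ⟨row⟩ "PRICE DROP" ""
  let t := if dom ≥ 60 then ["long DOM"] else []
  if pr ≠ "" ∧ PySem.Str.strip pr ∉ (["", "0", "$0"] : List String) then "price cut" :: t else t

-- B's item list for one field
def itemsOf (f : String) : List (String × List String × String) :=
  [(f, ["foreclosure", "pre-foreclosure"], "pre-foreclosure"),
   (f, ["short sale"], "short sale"),
   (f, ["reo", "bank owned", "bank-owned"], "REO"),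
   (f, ["auction"], "auction")]

theorem chunkA_out (f : String) (acc : List String) : chunkA f acc = acc ++ chunkA f [] := by
  unfold chunkA
  split_ifs <;> simp

theorem pvGo_append (a b : List (String × List String × String)) (t : List String) :
    pvGo (a ++ b) t = pvGo a (pvGo b t) := by
  induction a with
  | nil => rfl
  | cons p rest ih =>
    obtain ⟨f, kws, fl⟩ := p
    simp only [List.cons_append, pvGo, ih]

theorem pvGo_itemsOf (f : String) (t : List String) : pvGo (itemsOf f) t = chunkA f [] ++ t := by
  simp only [itemsOf, pvGo, List.any_cons, List.any_nil, Bool.or_false]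
  unfold chunkA
  split_ifs <;> simp_all

theorem tailAfterA_eq (row : List (String × String)) (dom : Int) (flags : List String) :
    tailAfterA row dom flags = flags ++ tailB row dom := by
  unfold tailAfterA tailB
  by_cases h90 : dom ≥ 90
  · rw [if_pos h90, if_pos (show dom ≥ 60 by omega)]
    split_ifs <;> simp_all
  · rw [if_neg h90]
    split_ifs <;> simp_all

-- ===== VERDICT (by name: the statement is the Claim_ definition above) =====
theorem parse_distress_flags_py_spec : Claim_equal_parse_distress_flags_py := by
  intro row dom _
  unfold Spec_parse_distress_flags_py
  have hA : parse_distress_flags_py row dom =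
      tailAfterA row dom
        (chunkA (PySem.Str.lower (PySem.Dict.getD ⟨row⟩ "TAGS" ""))
          (chunkA (PySem.Str.lower (PySem.Dict.getD ⟨row⟩ "STATUS" "")) [])) := rfl
  have hB : parse_distress_flags_py_alt row dom =
      pvGo (itemsOf (PySem.Str.lower (PySem.Dict.getD ⟨row⟩ "STATUS" "")) ++
            itemsOf (PySem.Str.lower (PySem.Dict.getD ⟨row⟩ "TAGS" "")))
        (tailB row dom) := rfl
  rw [hA, hB, pvGo_append, pvGo_itemsOf, pvGo_itemsOf, tailAfterA_eq,
    chunkA_out _ (chunkA _ [])]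
  simp [List.append_assoc]
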